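-- pv_equiv track=rewrite | github.com/ProofCodec/proofcodec-verify | proofcodec_verify/codec/combinadic.py | _find_largest_binom_le
-- ===== SOURCE A (Python) =====
-- import math
--
-- def binom(n: int, k: int) -> int:
--     """Compute binomial coefficient C(n, k).
--
--     Returns 0 if k < 0 or k > n, consistent with combinadic convention.
--     """
--     if k < 0 or k > n:
--         return 0
--     return math.comb(n, k)
--
-- def _find_largest_binom_le(target: int, k: int, lo: int, hi: int) -> int:
--     """Find largest i in [lo, hi] such that C(i, k) <= target."""
--     if lo > hi:
--         return lo - 1
--
--     if hi - lo < 32: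
--         result = lo - 1
--         for i in range(lo, hi + 1):
--             if binom(i, k) <= target:
--                 result = i
--             else:
--                 break
--         return result
--
--     result = lo - 1
--     while lo <= hi:
--         mid = (lo + hi) // 2
--         c = binom(mid, k)
--         if c <= target:
--             result = mid
--             lo = mid + 1
--         else:
--             hi = mid - 1
--
--     return result
-- ===== SOURCE B (Python) =====
-- def _find_largest_binom_le(target: int, k: int, lo: int, hi: int) -> int:
--     """Find largest i in [lo, hi] such that C(i, k) <= target.
--
--     Closed forms for k <= 1 (and degenerate targets), and for k >= 2 an
--     incremental Pascal-ratio walk growing C(n, k) from C(k, k) = 1 --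
--     no binary search and no scan over [lo, hi].
--     """
--     if lo > hi or target < 0:
--         return lo - 1
--     if k < 0:
--         return hi                      # C(i, k) == 0 <= target everywhere
--     if target == 0:
--         return max(lo - 1, min(hi, k - 1))   # C(i, k) == 0 exactly for i < k
--     if k == 0:
--         return hi                      # C(i, 0) <= 1 <= target
--     if k == 1:
--         return max(lo - 1, min(hi, target))  # C(i, 1) == max(i, 0)
--     n, c = k, 1                        # c == C(n, k)
--     while n < hi:
--         c2 = c * (n + 1) // (n + 1 - k)      # exact: C(n+1, k)
--         if c2 > target:
--             break
--         n, c = n + 1, c2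
--     return max(lo - 1, min(hi, n))
-- ===== Notes on version B (the rewrite author's own statement) =====
-- stated objective: alternative
-- what changed: Replaces A's linear-scan/binary-search hybrid over [lo, hi] with closed-form answers for k <= 1 (and for negative targets, negative k, target == 0) plus, for k >= 2, an incremental Pascal-ratio walk that grows C(n, k) from C(k, k) = 1 by exact multiply/divide steps, never searching the [lo, hi] range and never calling math.comb.
import Mathlib
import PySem

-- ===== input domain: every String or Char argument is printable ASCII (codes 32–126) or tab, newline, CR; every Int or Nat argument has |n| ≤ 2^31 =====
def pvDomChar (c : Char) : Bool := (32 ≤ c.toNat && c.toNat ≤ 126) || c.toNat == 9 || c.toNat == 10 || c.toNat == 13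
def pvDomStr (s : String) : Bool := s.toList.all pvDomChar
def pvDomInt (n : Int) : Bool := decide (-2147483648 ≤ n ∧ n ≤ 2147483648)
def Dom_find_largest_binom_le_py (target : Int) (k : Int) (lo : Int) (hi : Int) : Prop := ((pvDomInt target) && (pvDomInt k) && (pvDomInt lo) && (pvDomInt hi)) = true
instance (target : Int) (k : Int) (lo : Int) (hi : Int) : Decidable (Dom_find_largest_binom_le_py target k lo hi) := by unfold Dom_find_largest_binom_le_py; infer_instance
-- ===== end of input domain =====

-- B replaces A's linear-scan/binary-search hybrid by closed forms for k ≤ 1 and an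
-- incremental Pascal-ratio walk for k ≥ 2 (objective: alternative algorithm, no search over [lo, hi]).

-- ===== PORT A =====
-- binom(n, k): 0 if k < 0 or k > n, else math.comb(n, k) (exact: Nat.choose on the nonnegative domain)
def binomZ (n : Int) (k : Int) : Int :=
  if k < 0 ∨ n < k then 0 else ((n.toNat.choose k.toNat : Nat) : Int)

-- the `for i in range(lo, hi+1)` loop with `break` (result accumulator)
def aScan (target : Int) (k : Int) (hi : Int) (i : Int) (result : Int) : Int :=
  if hi < i then result
  else if binomZ i k ≤ target then aScan target k hi (i + 1) i
  else result
termination_by (hi + 1 - i).toNat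
decreasing_by
  rename_i hle _
  exact (Int.toNat_lt_toNat (Int.sub_pos.mpr (Int.lt_add_one_iff.mpr (Int.not_lt.mp hle)))).mpr
    (sub_lt_sub_left (lt_add_one i) (hi + 1))

-- the `while lo <= hi` binary-search loop; mid = (lo + hi) // 2 (Python floor division)
def aBin (target : Int) (k : Int) (lo : Int) (hi : Int) (result : Int) : Int :=
  if lo ≤ hi then
    if binomZ (PySem.Int.floordiv (lo + hi) 2) k ≤ target then
      aBin target k (PySem.Int.floordiv (lo + hi) 2 + 1) hi (PySem.Int.floordiv (lo + hi) 2)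
    else
      aBin target k lo (PySem.Int.floordiv (lo + hi) 2 - 1) result
  else result
termination_by (hi + 1 - lo).toNat
decreasing_by
  · rename_i hle _
    exact (Int.toNat_lt_toNat (Int.sub_pos.mpr (Int.lt_add_one_iff.mpr hle))).mpr
      (sub_lt_sub_left (Int.lt_add_one_iff.mpr
        (PySem.Int.floordiv_two_mid_bounds (lo := lo) (hi := hi) hle).1) (hi + 1))
  · rename_i hle _
    rw [Int.sub_add_cancel]
    exact (Int.toNat_lt_toNat (Int.sub_pos.mpr (Int.lt_add_one_iff.mpr hle))).mpr
      (sub_lt_sub_right (Int.lt_add_one_iff.mpr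
        (PySem.Int.floordiv_two_mid_bounds (lo := lo) (hi := hi) hle).2) lo)

def find_largest_binom_le_py (target : Int) (k : Int) (lo : Int) (hi : Int) : Int :=
  if lo > hi then lo - 1
  else if hi - lo < 32 then aScan target k hi lo (lo - 1)
  else aBin target k lo hi (lo - 1)

-- ===== PORT B =====
-- the `while n < hi` loop of Source B: c == C(n, k); c2 = c * (n+1) // (n+1-k) (exact division)
def bGrow (target : Int) (k : Int) (hi : Int) (n : Int) (c : Int) : Int :=
  if n < hi then
    if target < PySem.Int.floordiv (c * (n + 1)) (n + 1 - k) then n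
    else bGrow target k hi (n + 1) (PySem.Int.floordiv (c * (n + 1)) (n + 1 - k))
  else n
termination_by (hi - n).toNat
decreasing_by
  rename_i hlt _
  exact (Int.toNat_lt_toNat (Int.sub_pos.mpr hlt)).mpr (sub_lt_sub_left (lt_add_one n) hi)

def find_largest_binom_le_py_alt (target : Int) (k : Int) (lo : Int) (hi : Int) : Int :=
  if lo > hi ∨ target < 0 then lo - 1
  else if k < 0 then hi
  else if target = 0 then max (lo - 1) (min hi (k - 1))
  else if k = 0 then hi
  else if k = 1 then max (lo - 1) (min hi target)
  else max (lo - 1) (min hi (bGrow target k hi k 1))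

-- ===== PRECONDITION & SPEC =====
def Spec_find_largest_binom_le_py (target : Int) (k : Int) (lo : Int) (hi : Int) (out : Int) : Prop := out = find_largest_binom_le_py_alt target k lo hi
instance (target : Int) (k : Int) (lo : Int) (hi : Int) (out : Int) : Decidable (Spec_find_largest_binom_le_py target k lo hi out) := by unfold Spec_find_largest_binom_le_py; infer_instance

-- ===== CLAIM (what is proved, stated in full; the proofs are below) =====
def Claim_equal_find_largest_binom_le_py : Prop := ∀ (target : Int) (k : Int) (lo : Int) (hi : Int), Dom_find_largest_binom_le_py target k lo hi → Spec_find_largest_binom_le_py target k lo hi (find_largest_binom_le_py target k lo hi)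

-- ===== LEMMAS AND PROOFS =====

-- "r is the answer": r ∈ [lo-1, hi], r = lo-1 or C(r,k) ≤ target, and r = hi or C(r+1,k) > target
def GoodFL (target : Int) (k : Int) (lo : Int) (hi : Int) (r : Int) : Prop :=
  lo - 1 ≤ r ∧ r ≤ hi ∧ (r = lo - 1 ∨ binomZ r k ≤ target) ∧ (r = hi ∨ ¬ binomZ (r + 1) k ≤ target)

lemma binomZ_nonneg (n k : Int) : 0 ≤ binomZ n k := by
  unfold binomZ; split
  · exact le_refl 0
  · exact Int.natCast_nonneg _

lemma binomZ_eq_choose {n k : Int} (hk : 0 ≤ k) (hkn : k ≤ n) :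
    binomZ n k = ((n.toNat.choose k.toNat : Nat) : Int) := by
  unfold binomZ; rw [if_neg (by omega)]

lemma binomZ_mono {i j : Int} (k : Int) (h : i ≤ j) : binomZ i k ≤ binomZ j k := by
  unfold binomZ
  by_cases hk : k < 0
  · simp [hk]
  · rw [not_lt] at hk
    by_cases hj : j < k
    · rw [if_pos (Or.inr (by omega)), if_pos (Or.inr hj)]
    · by_cases hi : i < k
      · rw [if_pos (Or.inr hi), if_neg (by omega)]
        exact Int.natCast_nonneg _
      · rw [if_neg (by omega), if_neg (by omega)]
        exact_mod_cast Nat.choose_le_choose k.toNat (by omega)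

lemma good_unique {target k lo hi r1 r2 : Int}
    (h1 : GoodFL target k lo hi r1) (h2 : GoodFL target k lo hi r2) : r1 = r2 := by
  have key : ∀ a b : Int, GoodFL target k lo hi a → GoodFL target k lo hi b → a < b → False := by
    rintro a b ⟨ha1, ha2, ha3, ha4⟩ ⟨hb1, hb2, hb3, hb4⟩ hab
    have hPb : binomZ b k ≤ target := hb3.resolve_left (by omega)
    have hna : ¬ binomZ (a + 1) k ≤ target := ha4.resolve_left (by omega)
    exact hna (le_trans (binomZ_mono k (by omega)) hPb)
  rcases lt_trichotomy r1 r2 with h | h | h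
  · exact absurd (key r1 r2 h1 h2 h) (fun f => f)
  · exact h
  · exact absurd (key r2 r1 h2 h1 h) (fun f => f)

lemma aScan_good (target k lo hi : Int) :
    ∀ m i result, (hi + 1 - i).toNat ≤ m → lo ≤ i → i ≤ hi + 1 → result = i - 1 →
      (i = lo ∨ binomZ (i - 1) k ≤ target) →
      GoodFL target k lo hi (aScan target k hi i result) := by
  intro m
  induction m with
  | zero =>
    intro i result hm h1 h2 h3 h4
    rw [aScan, if_pos (by omega)]
    refine ⟨by omega, by omega, ?_, Or.inl (by omega)⟩
    rcases h4 with h4 | h4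
    · exact Or.inl (by omega)
    · exact Or.inr (by rwa [h3])
  | succ m IH =>
    intro i result hm h1 h2 h3 h4
    rw [aScan]
    by_cases hgt : hi < i
    · rw [if_pos hgt]
      refine ⟨by omega, by omega, ?_, Or.inl (by omega)⟩
      rcases h4 with h4 | h4
      · exact Or.inl (by omega)
      · exact Or.inr (by rwa [h3])
    · rw [if_neg hgt]
      by_cases hP : binomZ i k ≤ target
      · rw [if_pos hP]
        exact IH (i + 1) i (by omega) (by omega) (by omega) (by omega)
          (Or.inr (by rwa [show i + 1 - 1 = i by ring]))
      · rw [if_neg hP]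
        refine ⟨by omega, by omega, ?_, Or.inr (by rwa [h3, show i - 1 + 1 = i by ring])⟩
        rcases h4 with h4 | h4
        · exact Or.inl (by omega)
        · exact Or.inr (by rwa [h3])

lemma aBin_good (target k lo0 hi0 : Int) :
    ∀ m lo hi result, (hi + 1 - lo).toNat ≤ m → lo0 ≤ lo → lo ≤ hi + 1 → hi ≤ hi0 →
      result = lo - 1 → (lo = lo0 ∨ binomZ (lo - 1) k ≤ target) →
      (hi = hi0 ∨ ¬ binomZ (hi + 1) k ≤ target) →
      GoodFL target k lo0 hi0 (aBin target k lo hi result) := by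
  intro m
  induction m with
  | zero =>
    intro lo hi result hm h1 h2 h3 h4 h5 h6
    rw [aBin, if_neg (by omega)]
    refine ⟨by omega, by omega, ?_, ?_⟩
    · rcases h5 with h5 | h5
      · exact Or.inl (by omega)
      · exact Or.inr (by rwa [h4])
    · rcases h6 with h6 | h6
      · exact Or.inl (by omega)
      · exact Or.inr (by rwa [h4, show lo - 1 + 1 = lo by ring, show lo = hi + 1 by omega])
  | succ m IH =>
    intro lo hi result hm h1 h2 h3 h4 h5 h6
    rw [aBin]
    by_cases hlh : lo ≤ hi
    · rw [if_pos hlh]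
      have hmid := PySem.Int.floordiv_two_mid_bounds (lo := lo) (hi := hi) hlh
      by_cases hP : binomZ (PySem.Int.floordiv (lo + hi) 2) k ≤ target
      · rw [if_pos hP]
        exact IH _ hi _ (by omega) (by omega) (by omega) h3 (by ring)
          (Or.inr (by rwa [show PySem.Int.floordiv (lo + hi) 2 + 1 - 1 =
            PySem.Int.floordiv (lo + hi) 2 by ring])) h6
      · rw [if_neg hP]
        exact IH lo _ result (by omega) h1 (by omega) (by omega) h4 h5
          (Or.inr (by rwa [show PySem.Int.floordiv (lo + hi) 2 - 1 + 1 =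
            PySem.Int.floordiv (lo + hi) 2 by ring]))
    · rw [if_neg hlh]
      refine ⟨by omega, by omega, ?_, ?_⟩
      · rcases h5 with h5 | h5
        · exact Or.inl (by omega)
        · exact Or.inr (by rwa [h4])
      · rcases h6 with h6 | h6
        · exact Or.inl (by omega)
        · exact Or.inr (by rwa [h4, show lo - 1 + 1 = lo by ring, show lo = hi + 1 by omega])

lemma a_good (target k lo hi : Int) (h : lo ≤ hi) :
    GoodFL target k lo hi (find_largest_binom_le_py target k lo hi) := by
  unfold find_largest_binom_le_py
  rw [if_neg (by omega)]
  by_cases hs : hi - lo < 32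
  · rw [if_pos hs]
    exact aScan_good target k lo hi (hi + 1 - lo).toNat lo (lo - 1)
      (by omega) (by omega) (by omega) (by ring) (Or.inl rfl)
  · rw [if_neg hs]
    exact aBin_good target k lo hi (hi + 1 - lo).toNat lo hi (lo - 1)
      (by omega) (by omega) (by omega) (by omega) (by ring) (Or.inl rfl) (Or.inl rfl)

lemma bGrow_good (target k hi : Int) (hk : 2 ≤ k) :
    ∀ m n c, (hi - n).toNat ≤ m → k ≤ n → n ≤ hi →
      c = ((n.toNat.choose k.toNat : Nat) : Int) → c ≤ target →
      k ≤ bGrow target k hi n c ∧ bGrow target k hi n c ≤ hi ∧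
      binomZ (bGrow target k hi n c) k ≤ target ∧
      (bGrow target k hi n c = hi ∨ ¬ binomZ (bGrow target k hi n c + 1) k ≤ target) := by
  intro m
  induction m with
  | zero =>
    intro n c hm h1 h2 h3 h4
    rw [bGrow, if_neg (by omega)]
    exact ⟨h1, h2, by rw [binomZ_eq_choose (by omega) h1, ← h3]; exact h4, Or.inl (by omega)⟩
  | succ m IH =>
    intro n c hm h1 h2 h3 h4
    have hkey : PySem.Int.floordiv (c * (n + 1)) (n + 1 - k) =
        (((n + 1).toNat.choose k.toNat : Nat) : Int) := by
      have hc := Nat.choose_mul_succ_eq n.toNat k.toNat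
      have hcast : c * (n + 1) = (((n + 1).toNat.choose k.toNat : Nat) : Int) * (n + 1 - k) := by
        have hn1 : (n + 1).toNat = n.toNat + 1 := by omega
        have hn' : ((n.toNat : Nat) : Int) = n := by omega
        have hk' : ((k.toNat : Nat) : Int) = k := by omega
        rw [h3, hn1]
        calc ((n.toNat.choose k.toNat : Nat) : Int) * (n + 1)
            = ((n.toNat.choose k.toNat * (n.toNat + 1) : Nat) : Int) := by push_cast; rw [hn']
          _ = (((n.toNat + 1).choose k.toNat * (n.toNat + 1 - k.toNat) : Nat) : Int) := by rw [hc]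
          _ = (((n.toNat + 1).choose k.toNat : Nat) : Int) * (n + 1 - k) := by
              push_cast [Nat.cast_sub (show k.toNat ≤ n.toNat + 1 by omega)]
              rw [hn', hk']
      rw [hcast, PySem.Int.floordiv_eq_ediv_of_pos (by omega),
        Int.mul_ediv_cancel _ (by omega)]
    rw [bGrow]
    by_cases hn : n < hi
    · rw [if_pos hn]
      by_cases hbig : target < PySem.Int.floordiv (c * (n + 1)) (n + 1 - k)
      · rw [if_pos hbig]
        refine ⟨h1, by omega, by rw [binomZ_eq_choose (by omega) h1, ← h3]; exact h4,
          Or.inr ?_⟩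
        rw [binomZ_eq_choose (by omega) (by omega), ← hkey]
        omega
      · rw [if_neg hbig]
        exact IH (n + 1) _ (by omega) (by omega) (by omega) hkey (by omega)
    · rw [if_neg hn]
      exact ⟨h1, h2, by rw [binomZ_eq_choose (by omega) h1, ← h3]; exact h4, Or.inl (by omega)⟩

lemma alt_good (target k lo hi : Int) (h : lo ≤ hi) :
    GoodFL target k lo hi (find_largest_binom_le_py_alt target k lo hi) := by
  unfold find_largest_binom_le_py_alt
  by_cases ht : target < 0
  · rw [if_pos (Or.inr ht)]
    refine ⟨le_refl _, by omega, Or.inl rfl, Or.inr ?_⟩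
    have := binomZ_nonneg (lo - 1 + 1) k
    omega
  · rw [if_neg (by omega)]
    by_cases hk : k < 0
    · rw [if_pos hk]
      refine ⟨by omega, le_refl _, Or.inr ?_, Or.inl rfl⟩
      unfold binomZ; rw [if_pos (Or.inl hk)]; omega
    · rw [if_neg hk]
      by_cases ht0 : target = 0
      · rw [if_pos ht0]
        refine ⟨le_max_left _ _, by omega, ?_, ?_⟩
        · rcases le_or_gt (min hi (k - 1)) (lo - 1) with hc | hc
          · exact Or.inl (by omega)
          · refine Or.inr ?_
            have hr : max (lo - 1) (min hi (k - 1)) = min hi (k - 1) := by omega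
            rw [hr]
            unfold binomZ; rw [if_pos (Or.inr (by omega))]; omega
        · rcases le_or_gt hi (k - 1) with hc | hc
          · exact Or.inl (by omega)
          · refine Or.inr ?_
            have hr : max (lo - 1) (min hi (k - 1)) + 1 = max lo k := by omega
            rw [hr, binomZ_eq_choose (by omega) (by omega), ht0]
            have := Nat.choose_pos (n := (max lo k).toNat) (k := k.toNat) (by omega)
            omega
      · rw [if_neg ht0]
        by_cases hk0 : k = 0
        · rw [if_pos hk0]
          refine ⟨by omega, le_refl _, Or.inr ?_, Or.inl rfl⟩
          subst hk0
          unfold binomZ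
          by_cases hhi : hi < 0
          · rw [if_pos (Or.inr hhi)]; omega
          · rw [if_neg (by omega)]
            have : hi.toNat.choose (0 : Int).toNat = 1 := by
              simp [Int.toNat_zero]
            rw [this]; omega
        · rw [if_neg hk0]
          by_cases hk1 : k = 1
          · rw [if_pos hk1]
            subst hk1
            have hval : ∀ j : Int, binomZ j 1 = max j 0 := by
              intro j
              unfold binomZ
              by_cases hj : j < 1
              · rw [if_pos (Or.inr hj)]
                have := binomZ_nonneg j 1
                omega
              · rw [if_neg (by omega)]
                have : (1 : Int).toNat = 1 := rfl
                rw [this, Nat.choose_one_right]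
                omega
            refine ⟨le_max_left _ _, by omega, ?_, ?_⟩
            · rcases le_or_gt (min hi target) (lo - 1) with hc | hc
              · exact Or.inl (by omega)
              · refine Or.inr ?_
                rw [show max (lo - 1) (min hi target) = min hi target by omega, hval]
                omega
            · rcases le_or_gt hi target with hc | hc
              · exact Or.inl (by omega)
              · refine Or.inr ?_
                rw [show max (lo - 1) (min hi target) + 1 = max lo (target + 1) by omega, hval]
                omega
          · rw [if_neg hk1]
            by_cases hkhi : hi < k
            · -- loop never runs: bGrow returns k; answer is hi (C(i,k)=0 on [lo,hi])
              have hg : bGrow target k hi k 1 = k := by rw [bGrow, if_neg (by omega)]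
              rw [hg, show max (lo - 1) (min hi k) = hi by omega]
              refine ⟨by omega, le_refl _, Or.inr ?_, Or.inl rfl⟩
              unfold binomZ; rw [if_pos (Or.inr hkhi)]; omega
            · have hstart : (1 : Int) = ((k.toNat.choose k.toNat : Nat) : Int) := by
                rw [Nat.choose_self]; rfl
              obtain ⟨hg1, hg2, hg3, hg4⟩ := bGrow_good target k hi (by omega)
                (hi - k).toNat k 1 (by omega) (le_refl _) (by omega) hstart (by omega)
              refine ⟨le_max_left _ _, by omega, ?_, ?_⟩
              · rcases le_or_gt (min hi (bGrow target k hi k 1)) (lo - 1) with hc | hc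
                · exact Or.inl (by omega)
                · refine Or.inr ?_
                  rw [show max (lo - 1) (min hi (bGrow target k hi k 1)) =
                    bGrow target k hi k 1 by omega]
                  exact hg3
              · rcases hg4 with hg4 | hg4
                · exact Or.inl (by omega)
                · rcases le_or_gt (bGrow target k hi k 1) (lo - 1) with hc | hc
                  · refine Or.inr fun hcon => hg4 ?_
                    exact le_trans (binomZ_mono k (by omega)) hcon
                  · refine Or.inr ?_
                    rw [show max (lo - 1) (min hi (bGrow target k hi k 1)) + 1 =
                      bGrow target k hi k 1 + 1 by omega]
                    exact hg4

-- ===== VERDICT (by name: the statement is the Claim_ definition above) =====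
theorem find_largest_binom_le_py_spec : Claim_equal_find_largest_binom_le_py := by
  intro target k lo hi _
  unfold Spec_find_largest_binom_le_py
  by_cases hgt : hi < lo
  · unfold find_largest_binom_le_py find_largest_binom_le_py_alt
    rw [if_pos (show lo > hi from hgt), if_pos (Or.inl (show lo > hi from hgt))]
  · exact good_unique (a_good target k lo hi (by omega)) (alt_good target k lo hi (by omega))
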